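-- pv_equiv track=rewrite | github.com/pypi-data/pypi-mirror-25 | packages/reverpf/reverpf-0.6.1.tar.gz/reverpf-0.6.1/reverpf/reverpf.py | _get_sep_positions
-- ===== SOURCE A (Python) =====
-- def _get_sep_positions(s, sep):
--     pos = [i for i in range(len(s)) if s.startswith(sep, i)]
--
--     new_pos = []
--     correct = 0
--
--     for i in pos:
--         new_pos.append(i - correct)
--         correct += len(sep)
--
--     return new_pos
-- ===== SOURCE B (Python) =====
-- def _get_sep_positions(s, sep):
--     n, m = len(s), len(sep)
--     if m == 0:
--         return list(range(n))
--     if m > n: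
--         return []
--     B, P = 131, 1000000007
--     hp = 0
--     for c in sep:
--         hp = (hp * B + ord(c)) % P
--     hw = 0
--     for c in s[:m]:
--         hw = (hw * B + ord(c)) % P
--     powm = pow(B, m - 1, P)
--     out = []
--     k = 0
--     for i in range(n - m + 1):
--         if hw == hp and s[i:i + m] == sep:
--             out.append(i - k * m)
--             k += 1
--         if i + m < n:
--             hw = ((hw - ord(s[i]) * powm) * B + ord(s[i + m])) % P
--     return out
-- ===== Notes on version B (the rewrite author's own statement) =====
-- stated objective: alternative
-- what changed: Replaces A's per-index startswith scan plus a second offset pass with a single Rabin-Karp rolling-hash scan (character comparison only on a hash hit, closed forms for empty/too-long sep) that applies the cumulative offset on the fly.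
import Mathlib
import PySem

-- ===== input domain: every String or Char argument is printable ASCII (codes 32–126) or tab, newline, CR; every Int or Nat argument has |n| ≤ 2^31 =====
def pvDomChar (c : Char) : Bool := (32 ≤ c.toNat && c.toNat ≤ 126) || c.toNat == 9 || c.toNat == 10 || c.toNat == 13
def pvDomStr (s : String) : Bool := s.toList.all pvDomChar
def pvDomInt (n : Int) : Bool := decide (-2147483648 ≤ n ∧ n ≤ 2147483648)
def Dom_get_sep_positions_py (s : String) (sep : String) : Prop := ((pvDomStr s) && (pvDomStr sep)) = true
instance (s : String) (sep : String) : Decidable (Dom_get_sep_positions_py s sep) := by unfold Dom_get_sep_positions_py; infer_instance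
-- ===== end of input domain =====

-- B replaces A's per-index startswith scan plus second offset pass with a Rabin–Karp
-- rolling-hash scan (character compare only on a hash hit), applying the cumulative
-- offset on the fly; same return value.

-- ===== PORT A =====
-- s.startswith(sep, i) with 0 ≤ i is exactly "sep is a prefix of s[i:]"; every i drawn from
-- range(len(s)) is nonnegative, so the drop-based port is exact.
def get_sep_positions_py (s : String) (sep : String) : List Int :=
  let t := s.toList
  let p := sep.toList
  let pos : List Int :=
    (PySem.List.pyRange 0 (t.length : Int)).filter
      (fun i => PySem.Chars.startswith (t.drop i.toNat) p)
  (pos.foldl (fun (acc : List Int × Int) i => (acc.1 ++ [i - acc.2], acc.2 + (p.length : Int)))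
    ([], 0)).1

-- ===== PORT B =====
-- hp/hw accumulation loops of Source B: h = (h * B + ord(c)) % P over the chars (ord is exact on
-- the ASCII domain; Python % with the positive literal P is PySem.Int.mod)
def rkHash (B P : Int) (l : List Char) : Int :=
  l.foldl (fun h c => PySem.Int.mod (h * B + (c.toNat : Int)) P) 0

-- the trailing 'if i + m < n: hw = ((hw - ord(s[i])*powm)*B + ord(s[i+m])) % P' of Source B's loop
-- body; both indices are in range there, so s[i]/s[i+m] are List.getD with an unused default
def rkStep (t p : List Char) (B P powm : Int) (i : Nat) (hw : Int) : Int :=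
  if i + p.length < t.length then
    PySem.Int.mod ((hw - ((t.getD i ' ').toNat : Int) * powm) * B + ((t.getD (i + p.length) ' ').toNat : Int)) P
  else hw

-- Source B's 'for i in range(n - m + 1)' loop; s[i:i+m] == sep ported as (t.drop i).take m = p
-- (both slice bounds nonnegative)
def rkLoop (t p : List Char) (B P hp powm : Int) (i : Nat) (hw : Int) (k : Nat) : List Int :=
  if hstop : t.length < i + p.length then []
  else if hw = hp ∧ (t.drop i).take p.length = p then
    ((i : Int) - (k : Int) * (p.length : Int)) ::
      rkLoop t p B P hp powm (i + 1) (rkStep t p B P powm i hw) (k + 1)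
  else rkLoop t p B P hp powm (i + 1) (rkStep t p B P powm i hw) k
termination_by t.length + 1 - i
decreasing_by all_goals omega

def get_sep_positions_py_alt (s : String) (sep : String) : List Int :=
  let t := s.toList
  let p := sep.toList
  if p.length = 0 then PySem.List.pyRange 0 (t.length : Int)
  else if t.length < p.length then []
  else
    let hp := rkHash 131 1000000007 p
    let hw := rkHash 131 1000000007 (t.take p.length)
    let powm := PySem.Int.powMod 131 (p.length - 1) 1000000007   -- pow(B, m-1, P)
    rkLoop t p 131 1000000007 hp powm 0 hw 0

-- ===== PRECONDITION & SPEC =====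
def Spec_get_sep_positions_py (s : String) (sep : String) (out : List Int) : Prop := out = get_sep_positions_py_alt s sep
instance (s : String) (sep : String) (out : List Int) : Decidable (Spec_get_sep_positions_py s sep out) := by unfold Spec_get_sep_positions_py; infer_instance

-- ===== CLAIM (what is proved, stated in full; the proofs are below) =====
def Claim_equal_get_sep_positions_py : Prop := ∀ (s : String) (sep : String), Dom_get_sep_positions_py s sep → Spec_get_sep_positions_py s sep (get_sep_positions_py s sep)

-- ===== LEMMAS AND PROOFS =====

-- the (overlapping) match positions ≥ start, in increasing order
def occs (t p : List Char) (start : Nat) : List Nat :=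
  if h : t.length ≤ start then []
  else if PySem.Chars.startswith (t.drop start) p then start :: occs t p (start + 1)
  else occs t p (start + 1)
termination_by t.length - start

-- applying the cumulative offset c (stepping by L) to a list of positions
def ofs (L : Int) : List Nat → Int → List Int
  | [], _ => []
  | i :: r, c => ((i : Int) - c) :: ofs L r (c + L)

-- the exact polynomial value of a char list in base B (the quantity both hash loops track mod P)
def rkVal (B : Int) : List Char → Int
  | [] => 0
  | c :: r => (c.toNat : Int) * B ^ r.length + rkVal B r

theorem filter_range'_eq_occs (t p : List Char) (start n : Nat) (hn : start + n = t.length) :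
    (List.range' start n).filter (fun i => PySem.Chars.startswith (t.drop i) p)
      = occs t p start := by
  induction n generalizing start with
  | zero => rw [occs]; simp [show t.length ≤ start by omega]
  | succ m ih =>
    rw [occs]
    have hlt : ¬ t.length ≤ start := by omega
    rw [List.range'_succ, List.filter_cons]
    simp only [hlt, dif_neg, not_false_iff]
    by_cases hs : PySem.Chars.startswith (t.drop start) p
    · simp [hs, ih (start + 1) (by omega)]
    · simp [hs, ih (start + 1) (by omega)]

theorem occs_nil_of_no_match (t p : List Char) (start : Nat)
    (h : ∀ i, start ≤ i → ¬ p <+: t.drop i) : occs t p start = [] := by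
  induction start using occs.induct t p with
  | case1 s hle => rw [occs]; simp [hle]
  | case2 s hle hs ih =>
    exact absurd ((PySem.Chars.startswith_iff _ _).mp hs) (h s le_rfl)
  | case3 s hle hs ih =>
    rw [occs]
    simp only [hle, dif_neg, not_false_iff, hs]
    exact ih (fun i hi => h i (by omega))

-- beyond the last full window no match fits
theorem occs_nil_short (t p : List Char) (start : Nat) (hp : p ≠ [])
    (h : t.length < start + p.length) : occs t p start = [] := by
  refine occs_nil_of_no_match t p start (fun i hi hpre => ?_)
  have hlen := hpre.length_le
  have : p.length ≠ 0 := fun h0 => hp (List.eq_nil_of_length_eq_zero h0)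
  simp [List.length_drop] at hlen
  omega

-- A's foldl produces exactly the offset map of the position list
theorem foldl_eq_ofs (L : Int) (l : List Nat) (acc : List Int) (c : Int) :
    ((l.map (fun n : Nat => (n : Int))).foldl
        (fun (a : List Int × Int) i => (a.1 ++ [i - a.2], a.2 + L)) (acc, c)).1
      = acc ++ ofs L l c := by
  induction l generalizing acc c with
  | nil => simp [ofs]
  | cons x r ih =>
    simp only [List.map_cons, List.foldl_cons, ofs]
    rw [ih, List.append_assoc, List.singleton_append]

-- with an empty separator the offsets are all zero
theorem ofs_zero (l : List Nat) : ofs 0 l 0 = l.map (fun n : Nat => (n : Int)) := by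
  induction l with
  | nil => rfl
  | cons x r ih => simp [ofs, ih]

-- the A-side filtered range is the match-position list, cast to Int
theorem posA_eq (t p : List Char) :
    ((PySem.List.pyRange 0 (t.length : Int)).filter
        (fun i => PySem.Chars.startswith (t.drop i.toNat) p))
      = (occs t p 0).map (fun n : Nat => (n : Int)) := by
  rw [PySem.List.pyRange_zero_natCast, List.filter_map]
  refine congrArg _ ?_
  rw [← filter_range'_eq_occs t p 0 t.length (by omega), List.range_eq_range']
  exact List.filter_congr (fun i _ => by simp)

-- a % P is congruent to a mod P, as an Int.ModEq (glue to chain ModEq combinators)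
theorem emod_modEq_self (a P : Int) : (a % P) ≡ a [ZMOD P] := Int.emod_emod_of_dvd a dvd_rfl

theorem rkVal_append_singleton (B : Int) (w : List Char) (d : Char) :
    rkVal B (w ++ [d]) = rkVal B w * B + (d.toNat : Int) := by
  induction w with
  | nil => simp [rkVal]
  | cons c r ih => simp [rkVal, ih, pow_succ]; ring

-- the hash loop computes the polynomial value mod P (for a nonempty list)
theorem rkHash_foldl (B P : Int) (hP : 0 < P) (l : List Char) (hl : l ≠ []) (h : Int) :
    l.foldl (fun h c => PySem.Int.mod (h * B + (c.toNat : Int)) P) h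
      = (h * B ^ l.length + rkVal B l) % P := by
  induction l generalizing h with
  | nil => exact absurd rfl hl
  | cons c r ih =>
    rw [List.foldl_cons, PySem.Int.mod_eq_emod_of_pos hP]
    rcases eq_or_ne r [] with hr | hr
    · subst hr; simp [rkVal]
    · rw [ih hr]
      have hmod : ((h * B + (c.toNat : Int)) % P * B ^ r.length + rkVal B r) % P
          = ((h * B + (c.toNat : Int)) * B ^ r.length + rkVal B r) % P :=
        ((emod_modEq_self _ _).mul_right _).add_right _
      rw [hmod]
      congr 1
      simp [rkVal, pow_succ]; ring

theorem rkHash_eq (B P : Int) (hP : 0 < P) (l : List Char) (hl : l ≠ []) :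
    rkHash B P l = rkVal B l % P := by
  rw [rkHash, rkHash_foldl B P hP l hl 0, zero_mul, zero_add]

-- the rolling update keeps 'hw = value of the current window mod P'
theorem rkStep_inv (t p : List Char) (B P : Int) (hP : 0 < P) (i : Nat)
    (hlt : i + p.length < t.length) (hp : p ≠ []) (hw : Int)
    (hwv : hw = rkVal B ((t.drop i).take p.length) % P) :
    rkStep t p B P (B ^ (p.length - 1) % P) i hw
      = rkVal B ((t.drop (i + 1)).take p.length) % P := by
  obtain ⟨m', hm⟩ : ∃ m', p.length = m' + 1 :=
    ⟨p.length - 1, (Nat.succ_pred_eq_of_pos (List.length_pos_of_ne_nil hp)).symm⟩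
  have hi : i < t.length := by omega
  have hi2 : i + 1 + m' < t.length := by omega
  -- window i = t[i] :: tail,  window (i+1) = tail ++ [t[i+1+m']]
  have hwin1 : (t.drop i).take p.length = t[i] :: (t.drop (i + 1)).take m' := by
    rw [hm, List.drop_eq_getElem_cons hi, List.take_succ_cons]
  have hwin2 : (t.drop (i + 1)).take p.length
      = (t.drop (i + 1)).take m' ++ [t[i + 1 + m']] := by
    rw [hm, List.take_add_one]
    congr 1
    have hlen : m' < (t.drop (i + 1)).length := by simp [List.length_drop]; omega
    rw [List.getElem?_eq_getElem hlen, List.getElem_drop]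
    rfl
  have htail : ((t.drop (i + 1)).take m').length = m' := by
    simp [List.length_take, List.length_drop]; omega
  set w := rkVal B ((t.drop (i + 1)).take m') with hwdef
  have hX : rkVal B ((t.drop i).take p.length) = (t[i].toNat : Int) * B ^ m' + w := by
    rw [hwin1, rkVal, htail]
  rw [rkStep, if_pos hlt, PySem.Int.mod_eq_emod_of_pos hP, hwv, hX, hwin2,
    rkVal_append_singleton, hm]
  have hget1 : t.getD i ' ' = t[i] := List.getD_eq_getElem t ' ' hi
  have hget2 : t.getD (i + (m' + 1)) ' ' = t[i + 1 + m'] := by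
    rw [show i + (m' + 1) = i + 1 + m' by omega]
    exact List.getD_eq_getElem t ' ' hi2
  rw [hget1, hget2]
  have hmodeq :
      ((((t[i].toNat : Int) * B ^ m' + w) % P - (t[i].toNat : Int) * (B ^ (m' + 1 - 1) % P)) * B
          + (t[i + 1 + m'].toNat : Int)) % P
        = ((((t[i].toNat : Int) * B ^ m' + w) - (t[i].toNat : Int) * (B ^ (m' + 1 - 1))) * B
          + (t[i + 1 + m'].toNat : Int)) % P :=
    ((((emod_modEq_self _ _).sub
        ((emod_modEq_self _ _).mul_left _)).mul_right _).add_right _)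
  rw [hmodeq]
  congr 1
  simp only [Nat.add_sub_cancel]
  ring

-- B's scan produces the offset map of the match positions ≥ i
theorem rkLoop_eq (t p : List Char) (B P : Int) (hP : 0 < P) (hp : p ≠ [])
    (fuel : Nat) : ∀ (i : Nat) (hw : Int) (k : Nat), t.length + 1 - i ≤ fuel →
    (i + p.length ≤ t.length → hw = rkVal B ((t.drop i).take p.length) % P) →
    rkLoop t p B P (rkVal B p % P) (B ^ (p.length - 1) % P) i hw k
      = ofs (p.length : Int) (occs t p i) ((k : Int) * (p.length : Int)) := by
  induction fuel with
  | zero =>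
    intro i hw k hf _
    have hm : p.length ≠ 0 := fun h0 => hp (List.eq_nil_of_length_eq_zero h0)
    rw [rkLoop, dif_pos (by omega), occs_nil_short t p i hp (by omega)]
    rfl
  | succ f ih =>
    intro i hw k hf hinv
    by_cases hstop : t.length < i + p.length
    · rw [rkLoop, dif_pos hstop, occs_nil_short t p i hp hstop]
      rfl
    · have him : i + p.length ≤ t.length := by omega
      have hm : p.length ≠ 0 := fun h0 => hp (List.eq_nil_of_length_eq_zero h0)
      have hwv := hinv him
      have hoccs : occs t p i
          = if PySem.Chars.startswith (t.drop i) p then i :: occs t p (i + 1)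
            else occs t p (i + 1) := by
        rw [occs]; simp [show ¬ t.length ≤ i by omega]
      have hsw : PySem.Chars.startswith (t.drop i) p = true
          ↔ (t.drop i).take p.length = p := by
        rw [PySem.Chars.startswith_iff, List.prefix_iff_eq_take]
        exact ⟨fun h => h.symm, fun h => h.symm⟩
      have hrec : ∀ k' : Nat,
          rkLoop t p B P (rkVal B p % P) (B ^ (p.length - 1) % P) (i + 1)
              (rkStep t p B P (B ^ (p.length - 1) % P) i hw) k'
            = ofs (p.length : Int) (occs t p (i + 1)) ((k' : Int) * (p.length : Int)) := by
        intro k'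
        refine ih (i + 1) _ k' (by omega) (fun hle => ?_)
        exact rkStep_inv t p B P hP i (by omega) hp hw hwv
      by_cases htk : (t.drop i).take p.length = p
      · rw [rkLoop, dif_neg hstop, if_pos ⟨by rw [hwv, htk], htk⟩, hoccs,
          if_pos (hsw.mpr htk), ofs, hrec (k + 1)]
        congr 2
        push_cast; ring
      · rw [rkLoop, dif_neg hstop,
          if_neg (fun hand => htk hand.2), hoccs, hrec k]
        have : PySem.Chars.startswith (t.drop i) p ≠ true := fun h => htk (hsw.mp h)
        simp [this]

-- ===== VERDICT (by name: the statement is the Claim_ definition above) =====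
theorem get_sep_positions_py_spec : Claim_equal_get_sep_positions_py := by
  intro s sep _
  unfold Spec_get_sep_positions_py get_sep_positions_py get_sep_positions_py_alt
  simp only []
  rw [posA_eq, foldl_eq_ofs]
  by_cases hp : sep.toList.length = 0
  · rw [if_pos hp, List.eq_nil_of_length_eq_zero hp]
    simp only [List.length_nil, Nat.cast_zero, List.nil_append]
    rw [ofs_zero, PySem.List.pyRange_zero_natCast]
    congr 1
    rw [← filter_range'_eq_occs s.toList [] 0 s.toList.length (by omega), List.range_eq_range']
    exact List.filter_eq_self.mpr
      (fun i _ => (PySem.Chars.startswith_iff _ _).mpr (List.nil_prefix))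
  · have hpne : sep.toList ≠ [] := fun h => hp (by rw [h]; rfl)
    have hP : (0 : Int) < 1000000007 := by norm_num
    rw [if_neg hp]
    by_cases hshort : s.toList.length < sep.toList.length
    · rw [if_pos hshort, occs_nil_short s.toList sep.toList 0 hpne (by omega)]
      rfl
    · rw [if_neg hshort]
      have hpow : PySem.Int.powMod 131 (sep.toList.length - 1) 1000000007
          = (131 : Int) ^ (sep.toList.length - 1) % 1000000007 := by
        simp [PySem.Int.powMod]
      have htk : s.toList.take sep.toList.length ≠ [] := by
        intro h
        rcases List.take_eq_nil_iff.mp h with h0 | h0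
        · exact hp h0
        · rw [h0] at hshort; simp at hshort; exact hpne (by rw [hshort]; rfl)
      rw [hpow, rkHash_eq _ _ hP _ hpne, rkHash_eq _ _ hP _ htk,
        rkLoop_eq s.toList sep.toList 131 1000000007 hP hpne (s.toList.length + 1) 0 _ 0
          (by omega) (fun _ => by rw [List.drop_zero])]
      simp
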